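-- pv_equiv track=rewrite | github.com/arkadiusz-gasecki/ag | kickstart/2018/Round A/even_digits.py | make_smaller
-- ===== SOURCE A (Python) =====
-- def make_smaller(lst):
--
--     make_eight = False
--     for i, digit in enumerate(lst):
--         if make_eight: lst[i] = 8
--         elif digit % 2 == 1:
--             lst[i] -= 1
--             make_eight = True
--
--     smaller = int("".join(list(map(str,lst))))
--     return smaller
-- ===== SOURCE B (Python) =====
-- def make_smaller(lst):
--     # Backwards single pass. k counts digits already seen (the suffix to the
--     # right); 'pieces' holds, right-to-left, the rendering of the whole part
--     # scanned so far assuming no odd digit lies further left. An odd digit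
--     # resets it to str(d-1) followed by k eights; the leftmost odd digit is
--     # processed last, so its reset is the one that survives.
--     pieces = []
--     k = 0
--     for d in reversed(lst):
--         if d % 2 == 1:
--             pieces = ["8" * k, str(d - 1)]
--         else:
--             pieces.append(str(d))
--         k += 1
--     return int("".join(reversed(pieces)))
-- ===== Notes on version B (the rewrite author's own statement) =====
-- stated objective: alternative
-- what changed: A makes one left-to-right pass that mutates the list in place, carrying a make_eight flag that freezes every later digit to 8, then joins and parses; B never mutates: it folds over the list backwards, accumulating rendered string pieces and resetting the accumulator at every odd digit to str(d-1) plus the counted eights, so the leftmost odd digit (processed last) determines the final string.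
import Mathlib
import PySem

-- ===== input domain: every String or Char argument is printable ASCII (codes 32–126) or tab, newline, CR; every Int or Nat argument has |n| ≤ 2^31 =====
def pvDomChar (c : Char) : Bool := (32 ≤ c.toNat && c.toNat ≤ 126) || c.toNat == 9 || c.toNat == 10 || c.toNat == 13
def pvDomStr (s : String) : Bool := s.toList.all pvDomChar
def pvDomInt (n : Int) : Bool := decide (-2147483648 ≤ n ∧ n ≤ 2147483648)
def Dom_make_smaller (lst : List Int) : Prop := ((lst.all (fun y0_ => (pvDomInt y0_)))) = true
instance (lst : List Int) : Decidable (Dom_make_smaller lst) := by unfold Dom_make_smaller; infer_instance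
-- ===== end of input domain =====

-- B replaces A's in-place flag-carrying left-to-right rewrite pass by a backwards fold that accumulates
-- rendered pieces and is reset by each odd digit (the leftmost odd digit, processed last, wins); B does not
-- mutate lst (A does), so the equivalence proved here is about the return value only (objective: alternative).

-- ===== PORT A =====
-- int("".join(list(map(str, lst)))) — A's final line.
def pyJoinInt (l : List Int) : Int :=
  (PySem.Int.ofChars? (PySem.Chars.join [] (l.map PySem.Int.toChars))).getD 0

-- A's enumerate loop with the make_eight flag, as structural recursion over the same state.
def aLoop : List Int → Bool → List Int
  | [], _ => []
  | _ :: ds, true => 8 :: aLoop ds true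
  | d :: ds, false =>
      if PySem.Int.mod d 2 == 1 then (d - 1) :: aLoop ds true else d :: aLoop ds false

def make_smaller (lst : List Int) : Int := pyJoinInt (aLoop lst false)

-- ===== PORT B =====
-- Source B's loop body over reversed(lst): state = (pieces, k); an odd digit resets pieces,
-- an even digit appends its rendering; k counts digits already seen.
def bStep (st : List (List Char) × Nat) (d : Int) : List (List Char) × Nat :=
  (if PySem.Int.mod d 2 == 1 then [List.replicate st.2 '8', PySem.Int.toChars (d - 1)]
   else st.1 ++ [PySem.Int.toChars d], st.2 + 1)

def make_smaller_alt (lst : List Int) : Int :=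
  (PySem.Int.ofChars?
    (PySem.Chars.join [] ((lst.reverse.foldl bStep ([], 0)).1.reverse))).getD 0

-- ===== PRECONDITION & SPEC =====
-- Pre_ excludes exactly the inputs where Python's int("".join(...)) raises ValueError: the empty list,
-- and lists whose transformed digit sequence carries a negative entry at an index ≥ 1 (a '-' inside the
-- joined string). Both Pythons build the same string and raise identically there.
def Pre_make_smaller (lst : List Int) : Prop :=
  lst ≠ [] ∧
  (∀ d ∈ (lst.take (lst.findIdx (fun d => PySem.Int.mod d 2 == 1))).drop 1, 0 ≤ d) ∧
  (1 ≤ lst.findIdx (fun d => PySem.Int.mod d 2 == 1) →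
    lst.findIdx (fun d => PySem.Int.mod d 2 == 1) < lst.length →
    1 ≤ lst.getD (lst.findIdx (fun d => PySem.Int.mod d 2 == 1)) 0)
instance (lst : List Int) : Decidable (Pre_make_smaller lst) := by unfold Pre_make_smaller; infer_instance

def pvWitness_make_smaller : List Int := [1, 2, 3]

def Spec_make_smaller (lst : List Int) (out : Int) : Prop := out = make_smaller_alt lst
instance (lst : List Int) (out : Int) : Decidable (Spec_make_smaller lst out) := by unfold Spec_make_smaller; infer_instance

-- ===== CLAIM (what is proved, stated in full; the proofs are below) =====
def Claim_equal_make_smaller : Prop := ∀ (lst : List Int), Dom_make_smaller lst → Pre_make_smaller lst → Spec_make_smaller lst (make_smaller lst)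

-- ===== LEMMAS AND PROOFS =====

-- "".join with empty separator is list flattening.
theorem join_nil_eq_flatten (ls : List (List Char)) :
    PySem.Chars.join [] ls = ls.flatten := by
  induction ls with
  | nil => simp [PySem.Chars.join_nil]
  | cons p rest ih =>
    cases rest with
    | nil => simp [PySem.Chars.join_singleton]
    | cons q r => simp [PySem.Chars.join_cons_cons, ih]

theorem aLoop_true (ds : List Int) : aLoop ds true = List.replicate ds.length 8 := by
  induction ds with
  | nil => rfl
  | cons d ds ih => simp [aLoop, ih, List.replicate]

theorem bFold_len (ds : List Int) : (ds.reverse.foldl bStep ([], 0)).2 = ds.length := by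
  induction ds with
  | nil => rfl
  | cons d ds ih =>
    rw [List.reverse_cons, List.foldl_append]
    simp only [List.foldl_cons, List.foldl_nil, bStep, ih, List.length_cons]

theorem flatten_map_replicate_eight (n : Nat) :
    ((List.replicate n (8 : Int)).map PySem.Int.toChars).flatten = List.replicate n '8' := by
  induction n with
  | zero => rfl
  | succ n ih => simp only [List.replicate_succ, List.map_cons, List.flatten_cons, ih]; rfl

theorem bFold_keep (ds : List Int) :
    (ds.reverse.foldl bStep ([], 0)).1.reverse.flatten
      = ((aLoop ds false).map PySem.Int.toChars).flatten := by
  induction ds with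
  | nil => rfl
  | cons d ds ih =>
    rw [List.reverse_cons, List.foldl_append]
    cases h : (PySem.Int.mod d 2 == 1) with
    | true =>
      simp only [List.foldl_cons, List.foldl_nil, bStep, h, if_true, bFold_len,
        aLoop, List.reverse_cons, List.reverse_nil, List.nil_append, List.map_cons,
        aLoop_true, flatten_map_replicate_eight, List.flatten]
      simp
    | false =>
      simp only [List.foldl_cons, List.foldl_nil, bStep, h, Bool.false_eq_true, if_false,
        List.reverse_append, List.reverse_cons, List.reverse_nil, List.nil_append,
        List.cons_append, List.flatten_cons, aLoop, List.map_cons, ih]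

theorem make_smaller_eq_alt (lst : List Int) : make_smaller lst = make_smaller_alt lst := by
  unfold make_smaller make_smaller_alt pyJoinInt
  rw [join_nil_eq_flatten, join_nil_eq_flatten, bFold_keep]

-- ===== VERDICT (by name: the statement is the Claim_ definition above) =====
theorem make_smaller_spec : Claim_equal_make_smaller := by
  intro lst _ _
  exact make_smaller_eq_alt lst
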